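-- pv_equiv track=rewrite | github.com/YangTianze009/Codebook-Explanation | codebook_explanation_classification/explanation_evaluation/optimization_baseline.py | replace_tokens_with_baseline
-- ===== SOURCE A (Python) =====
-- def replace_tokens_with_baseline(initial_tokens, baseline_tokens, top_left, bottom_right):
--     new_tokens = initial_tokens.copy()
--     token_index = 0
--     for i in range(top_left[0], bottom_right[0]+1):
--         for j in range(top_left[1], bottom_right[1]+1):
--             index = i * 16 + j
--             if token_index < len(baseline_tokens):
--                 new_tokens[index] = baseline_tokens[token_index]
--                 token_index += 1
--     return new_tokens
-- ===== SOURCE B (Python) =====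
-- def replace_tokens_with_baseline(initial_tokens, baseline_tokens, top_left, bottom_right):
--     height = bottom_right[0] - top_left[0] + 1
--     width = bottom_right[1] - top_left[1] + 1
--     new_tokens = initial_tokens.copy()
--     if width <= 0 or height <= 0:
--         return new_tokens
--     limit = width * height
--     for k, val in enumerate(baseline_tokens):
--         if k >= limit:
--             break
--         r, c = divmod(k, width)
--         new_tokens[(top_left[0] + r) * 16 + top_left[1] + c] = val
--     return new_tokens
-- ===== Notes on version B (the rewrite author's own statement) =====
-- stated objective: alternative
-- what changed: B iterates over the baseline tokens (a single enumerate loop with a break) and reconstructs each target cell arithmetically with divmod, instead of A's nested row/column loops carrying a running token counter.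
import Mathlib
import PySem

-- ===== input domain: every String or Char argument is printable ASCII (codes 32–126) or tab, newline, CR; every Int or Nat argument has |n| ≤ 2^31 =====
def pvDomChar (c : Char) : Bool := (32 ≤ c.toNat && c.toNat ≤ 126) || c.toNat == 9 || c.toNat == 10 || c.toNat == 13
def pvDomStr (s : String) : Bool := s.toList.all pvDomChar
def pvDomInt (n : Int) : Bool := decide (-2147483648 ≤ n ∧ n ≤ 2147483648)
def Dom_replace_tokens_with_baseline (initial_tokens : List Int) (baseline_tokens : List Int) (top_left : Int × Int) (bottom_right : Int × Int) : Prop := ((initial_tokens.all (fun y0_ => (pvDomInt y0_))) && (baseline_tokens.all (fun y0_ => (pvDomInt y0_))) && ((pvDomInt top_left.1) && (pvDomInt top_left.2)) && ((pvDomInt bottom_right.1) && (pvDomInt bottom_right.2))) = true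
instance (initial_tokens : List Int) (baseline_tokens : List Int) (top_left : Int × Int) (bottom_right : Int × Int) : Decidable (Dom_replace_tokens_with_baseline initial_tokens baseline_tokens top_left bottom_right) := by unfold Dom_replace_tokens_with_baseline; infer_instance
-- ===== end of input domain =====

-- B replaces A's nested row/column loops (with a running token counter) by a single loop
-- over the baseline tokens that reconstructs each cell with divmod — same results (objective: alternative).

-- ===== PORT A =====
def replace_tokens_with_baseline (initial_tokens : List Int) (baseline_tokens : List Int) (top_left : Int × Int) (bottom_right : Int × Int) : List Int :=
  ((PySem.List.pyRange top_left.1 (bottom_right.1 + 1) 1).foldl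
    (fun (st : List Int × Nat) i =>
      (PySem.List.pyRange top_left.2 (bottom_right.2 + 1) 1).foldl
        (fun (st : List Int × Nat) j =>
          let index := i * 16 + j
          if st.2 < baseline_tokens.length then
            (PySem.List.pySetD st.1 index (PySem.List.pyGetD baseline_tokens (st.2 : Int) 0), st.2 + 1)
          else st)
        st)
    (initial_tokens, 0)).1

-- ===== PORT B =====
def replace_tokens_with_baseline_alt (initial_tokens : List Int) (baseline_tokens : List Int) (top_left : Int × Int) (bottom_right : Int × Int) : List Int :=
  let height := bottom_right.1 - top_left.1 + 1
  let width := bottom_right.2 - top_left.2 + 1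
  if width ≤ 0 ∨ height ≤ 0 then initial_tokens
  else
    let limit := width * height
    ((PySem.List.enumerate baseline_tokens 0).take limit.toNat).foldl
      (fun nt kv =>
        let r := PySem.Int.floordiv kv.1 width
        let c := PySem.Int.mod kv.1 width
        PySem.List.pySetD nt ((top_left.1 + r) * 16 + top_left.2 + c) kv.2)
      initial_tokens

-- ===== PRECONDITION & SPEC =====
-- Pre_: exactly the inputs on which A returns normally — every actually-written cell index
-- (the k-th write, k below min(len(baseline), region area)) must be a valid Python index
-- of initial_tokens; otherwise A (and B) raise IndexError.
def Pre_replace_tokens_with_baseline (initial_tokens : List Int) (baseline_tokens : List Int) (top_left : Int × Int) (bottom_right : Int × Int) : Prop :=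
  0 < bottom_right.2 - top_left.2 + 1 → 0 < bottom_right.1 - top_left.1 + 1 →
    ∀ k : Nat, k < min baseline_tokens.length ((bottom_right.2 - top_left.2 + 1) * (bottom_right.1 - top_left.1 + 1)).toNat →
      PySem.Raise.InRange initial_tokens.length
        ((top_left.1 + (k : Int) / (bottom_right.2 - top_left.2 + 1)) * 16 + top_left.2 + (k : Int) % (bottom_right.2 - top_left.2 + 1))
instance (initial_tokens : List Int) (baseline_tokens : List Int) (top_left : Int × Int) (bottom_right : Int × Int) : Decidable (Pre_replace_tokens_with_baseline initial_tokens baseline_tokens top_left bottom_right) := by unfold Pre_replace_tokens_with_baseline; infer_instance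

def pvWitness_replace_tokens_with_baseline : List Int × List Int × (Int × Int) × (Int × Int) := ([5, 6], [7], (0, 0), (0, 1))

def Spec_replace_tokens_with_baseline (initial_tokens : List Int) (baseline_tokens : List Int) (top_left : Int × Int) (bottom_right : Int × Int) (out : List Int) : Prop := out = replace_tokens_with_baseline_alt initial_tokens baseline_tokens top_left bottom_right
instance (initial_tokens : List Int) (baseline_tokens : List Int) (top_left : Int × Int) (bottom_right : Int × Int) (out : List Int) : Decidable (Spec_replace_tokens_with_baseline initial_tokens baseline_tokens top_left bottom_right out) := by unfold Spec_replace_tokens_with_baseline; infer_instance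

-- ===== CLAIM (what is proved, stated in full; the proofs are below) =====
def Claim_equal_replace_tokens_with_baseline : Prop := ∀ (initial_tokens : List Int) (baseline_tokens : List Int) (top_left : Int × Int) (bottom_right : Int × Int), Dom_replace_tokens_with_baseline initial_tokens baseline_tokens top_left bottom_right → Pre_replace_tokens_with_baseline initial_tokens baseline_tokens top_left bottom_right → Spec_replace_tokens_with_baseline initial_tokens baseline_tokens top_left bottom_right (replace_tokens_with_baseline initial_tokens baseline_tokens top_left bottom_right)

-- ===== LEMMAS AND PROOFS =====

-- the single write both programs perform
def pvWr (l : List Int) (p : Int × Int) : List Int := PySem.List.pySetD l p.1 p.2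

-- A's step on (current list, token counter)
def pvStep (b : List Int) (st : List Int × Nat) (idx : Int) : List Int × Nat :=
  if st.2 < b.length then (PySem.List.pySetD st.1 idx (PySem.List.pyGetD b (st.2 : Int) 0), st.2 + 1)
  else st

theorem pvStep_frozen (b : List Int) (cells : List Int) (l : List Int) (t : Nat) (h : b.length ≤ t) :
    cells.foldl (pvStep b) (l, t) = (l, t) := by
  induction cells with
  | nil => rfl
  | cons c cs ih => simp [List.foldl_cons, pvStep, Nat.not_lt.mpr h, ih]

theorem pvStep_char (b : List Int) (cells : List Int) : ∀ (l : List Int) (t : Nat),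
    (cells.foldl (pvStep b) (l, t)).1 = (cells.zip (b.drop t)).foldl pvWr l := by
  induction cells with
  | nil => intro l t; rfl
  | cons c cs ih =>
    intro l t
    by_cases h : t < b.length
    · have hd : b.drop t = b[t] :: b.drop (t + 1) := List.drop_eq_getElem_cons h
      have hv : PySem.List.pyGetD b (t : Int) 0 = b[t] := by
        simp [PySem.List.pyGetD_natCast, List.getD_eq_getElem?_getD, List.getElem?_eq_getElem h]
      rw [hd]
      simp only [List.foldl_cons, List.zip_cons_cons, pvStep, if_pos h, hv]
      exact ih _ _
    · rw [List.foldl_cons, pvStep, if_neg h, pvStep_frozen b cs l t (Nat.le_of_not_lt h)]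
      rw [List.drop_of_length_le (Nat.le_of_not_lt h)]
      simp
  
-- row-major flattening: a k-indexed single loop equals the nested row/column loops
theorem pvRowcol {α : Type} (n m : Nat) (f : Nat → Nat → α) :
    (List.range (n * m)).map (fun k => f (k / m) (k % m)) =
    (List.range n).flatMap (fun r => (List.range m).map (fun c => f r c)) := by
  induction n with
  | zero => simp
  | succ n ih =>
    have : (n + 1) * m = n * m + m := by ring
    rw [this, List.range_add, List.map_append, ih, List.range_succ, List.flatMap_append]
    congr 1
    simp only [List.flatMap_singleton, List.map_map]
    apply List.map_congr_left
    intro c hc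
    have hc' : c < m := List.mem_range.mp hc
    have hm : 0 < m := by omega
    have hdiv : (n * m + c) / m = n := by
      rw [Nat.mul_comm n m, Nat.mul_add_div hm]
      simp [Nat.div_eq_of_lt hc']
    have hmod : (n * m + c) % m = c := by
      rw [Nat.mul_comm n m, Nat.mul_add_mod]
      exact Nat.mod_eq_of_lt hc'
    simp [Function.comp, hdiv, hmod]

-- A rewritten as one fold of writes over the row-major cell list zipped with the baseline
theorem pvA_char (initial_tokens : List Int) (baseline_tokens : List Int) (top_left : Int × Int) (bottom_right : Int × Int) :
    replace_tokens_with_baseline initial_tokens baseline_tokens top_left bottom_right =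
    ((((List.range ((bottom_right.1 + 1 - top_left.1).toNat * (bottom_right.2 + 1 - top_left.2).toNat)).map
        (fun k => (top_left.1 + ((k / (bottom_right.2 + 1 - top_left.2).toNat : Nat) : Int)) * 16 +
          (top_left.2 + ((k % (bottom_right.2 + 1 - top_left.2).toNat : Nat) : Int)))).zip
        baseline_tokens).foldl pvWr initial_tokens) := by
  have h1 : ∀ (st : List Int × Nat) (i : Int),
      List.foldl (fun (st : List Int × Nat) j =>
          let index := i * 16 + j
          if st.2 < baseline_tokens.length then
            (PySem.List.pySetD st.1 index (PySem.List.pyGetD baseline_tokens (st.2 : Int) 0), st.2 + 1)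
          else st)
        st (PySem.List.pyRange top_left.2 (bottom_right.2 + 1) 1)
      = List.foldl (pvStep baseline_tokens) st
          ((PySem.List.pyRange top_left.2 (bottom_right.2 + 1) 1).map (fun j => i * 16 + j)) := by
    intro st i; rw [List.foldl_map]; rfl
  unfold replace_tokens_with_baseline
  simp only [h1]
  rw [← List.foldl_flatMap]
  rw [pvStep_char, List.drop_zero]
  congr 1
  rw [pvRowcol ((bottom_right.1 + 1 - top_left.1).toNat) ((bottom_right.2 + 1 - top_left.2).toNat)
      (fun r c => (top_left.1 + (r : Int)) * 16 + (top_left.2 + (c : Int)))]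
  rw [PySem.List.pyRange_one top_left.1 (bottom_right.1 + 1),
      PySem.List.pyRange_one top_left.2 (bottom_right.2 + 1)]
  simp [List.flatMap_map, List.map_map, Function.comp_def]

-- the two write schedules are the same list of (cell index, value) pairs
theorem pvLists_eq (bt : List Int) (tl br : Int × Int)
    (hw0 : 0 < br.2 - tl.2 + 1) (hh0 : 0 < br.1 - tl.1 + 1) :
    ((List.range ((br.1 - tl.1 + 1).toNat * (br.2 - tl.2 + 1).toNat)).map
        (fun k => (tl.1 + ((k / (br.2 - tl.2 + 1).toNat : Nat) : Int)) * 16 +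
          (tl.2 + ((k % (br.2 - tl.2 + 1).toNat : Nat) : Int)))).zip bt
    = ((PySem.List.enumerate bt 0).take ((br.2 - tl.2 + 1) * (br.1 - tl.1 + 1)).toNat).map
        (fun kv => ((tl.1 + PySem.Int.floordiv kv.1 (br.2 - tl.2 + 1)) * 16 + tl.2 +
          PySem.Int.mod kv.1 (br.2 - tl.2 + 1), kv.2)) := by
  obtain ⟨w', hw'⟩ : ∃ m : Nat, br.2 - tl.2 + 1 = (m : Int) :=
    ⟨_, (Int.toNat_of_nonneg (le_of_lt hw0)).symm⟩
  obtain ⟨h', hh'⟩ : ∃ m : Nat, br.1 - tl.1 + 1 = (m : Int) :=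
    ⟨_, (Int.toNat_of_nonneg (le_of_lt hh0)).symm⟩
  rw [hw', hh']
  simp only [Int.toNat_natCast, ← Int.natCast_mul]
  apply List.ext_getElem
  · simp [PySem.List.length_enumerate, Nat.mul_comm]
  · intro k hk1 hk2
    simp only [List.getElem_zip, List.getElem_map, List.getElem_range, List.getElem_take,
      PySem.List.getElem_enumerate, zero_add, PySem.Int.floordiv_natCast, PySem.Int.mod_natCast,
      Prod.mk.injEq]
    exact ⟨by ring, trivial⟩

-- ===== VERDICT (by name: the statement is the Claim_ definition above) =====
theorem replace_tokens_with_baseline_spec : Claim_equal_replace_tokens_with_baseline := by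
  intro it bt tl br _dom _pre
  unfold Spec_replace_tokens_with_baseline replace_tokens_with_baseline_alt
  rw [pvA_char]
  have e1 : br.1 + 1 - tl.1 = br.1 - tl.1 + 1 := by ring
  have e2 : br.2 + 1 - tl.2 = br.2 - tl.2 + 1 := by ring
  rw [e1, e2]
  by_cases hdeg : br.2 - tl.2 + 1 ≤ 0 ∨ br.1 - tl.1 + 1 ≤ 0
  · rw [if_pos hdeg]
    have hz : (br.1 - tl.1 + 1).toNat * (br.2 - tl.2 + 1).toNat = 0 := by
      rcases hdeg with h1 | h1 <;> simp [Int.toNat_of_nonpos h1]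
    simp [hz]
  · rw [if_neg hdeg]
    push Not at hdeg
    obtain ⟨hw0, hh0⟩ := hdeg
    rw [pvLists_eq bt tl br hw0 hh0, List.foldl_map]
    rfl
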